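-- pv_equiv track=rewrite | github.com/romer1979/elite-league-fpl | core/cities_league.py | format_captains
-- ===== SOURCE A (Python) =====
-- from collections import Counter
--
-- def format_captains(captains_list):
--     """Format captains list with x2, x3 for duplicates"""
--     if not captains_list:
--         return []
--
--     counter = Counter(captains_list)
--     formatted = []
--     for cap, count in counter.items():
--         if count > 1:
--             formatted.append(f"{cap} x{count}")
--         else:
--             formatted.append(cap)
--     return formatted
-- ===== SOURCE B (Python) =====
-- def format_captains(captains_list):
--     """Format captains list with x2, x3 for duplicates"""
--     formatted = []
--     rest = captains_list
--     while rest: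
--         cap = rest[0]
--         remaining = [c for c in rest[1:] if c != cap]
--         count = len(rest) - len(remaining)
--         formatted.append(f"{cap} x{count}" if count > 1 else cap)
--         rest = remaining
--     return formatted
-- ===== Notes on version B (the rewrite author's own statement) =====
-- stated objective: alternative
-- what changed: Replaces the Counter frequency table with a partition-peeling loop: repeatedly take the head captain, filter all its duplicates out of the remainder, and read the count off the length drop, so no frequency table, seen-set or per-element counting is kept.
import Mathlib
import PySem

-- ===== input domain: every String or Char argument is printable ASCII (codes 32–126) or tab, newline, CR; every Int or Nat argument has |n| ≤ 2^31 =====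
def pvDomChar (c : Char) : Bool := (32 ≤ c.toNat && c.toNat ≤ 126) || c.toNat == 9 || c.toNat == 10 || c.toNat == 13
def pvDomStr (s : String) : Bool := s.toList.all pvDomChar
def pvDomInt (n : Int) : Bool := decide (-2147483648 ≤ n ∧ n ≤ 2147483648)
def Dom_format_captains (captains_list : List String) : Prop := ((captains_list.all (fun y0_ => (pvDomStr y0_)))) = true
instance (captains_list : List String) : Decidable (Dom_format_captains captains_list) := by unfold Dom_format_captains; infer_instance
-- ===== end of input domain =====

-- B replaces A's Counter table with a partition-peeling loop (take the head captain,
-- filter its duplicates out of the remainder, read the count off the length drop);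
-- alternative decomposition, same output in first-appearance order.


-- ===== PORT A =====
def format_captains (captains_list : List String) : List String :=
  if captains_list = [] then []
  else
    let counter := PySem.Dict.counter captains_list
    counter.items.foldl
      (fun formatted p =>
        if p.2 > 1 then formatted ++ [p.1 ++ " x" ++ PySem.Int.toStr p.2]
        else formatted ++ [p.1]) []

-- ===== PORT B =====
-- the 'while rest:' loop of Source B, carrying (formatted, rest)
def fcLoop : List String → List String → List String
  | formatted, [] => formatted
  | formatted, cap :: tl =>
    let remaining := tl.filter (fun c => !(c == cap))
    let count : Int := ((cap :: tl).length : Int) - (remaining.length : Int)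
    fcLoop
      (formatted ++ [if count > 1 then cap ++ " x" ++ PySem.Int.toStr count else cap])
      remaining
termination_by _ rest => rest.length
decreasing_by
  simp only [List.length_cons, List.length_unattach]
  exact Nat.lt_succ_of_le (le_trans (List.length_filter_le _ _) (by simp))

def format_captains_alt (captains_list : List String) : List String :=
  fcLoop [] captains_list

-- ===== PRECONDITION & SPEC =====
def Spec_format_captains (captains_list : List String) (out : List String) : Prop := out = format_captains_alt captains_list
instance (captains_list : List String) (out : List String) : Decidable (Spec_format_captains captains_list out) := by unfold Spec_format_captains; infer_instance

-- ===== CLAIM (what is proved, stated in full; the proofs are below) =====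
def Claim_equal_format_captains : Prop := ∀ (captains_list : List String), Dom_format_captains captains_list → Spec_format_captains captains_list (format_captains captains_list)

-- ===== LEMMAS AND PROOFS =====

-- A's formatting of one (captain, count) item
def fcFmt (p : String × Int) : String :=
  if p.2 > 1 then p.1 ++ " x" ++ PySem.Int.toStr p.2 else p.1

lemma foldA (l : List (String × Int)) (acc : List String) :
    l.foldl (fun formatted p =>
      if p.2 > 1 then formatted ++ [p.1 ++ " x" ++ PySem.Int.toStr p.2]
      else formatted ++ [p.1]) acc = acc ++ l.map fcFmt := by
  induction l generalizing acc with
  | nil => simp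
  | cons p rest ih =>
    simp only [List.foldl_cons, List.map_cons, fcFmt]
    by_cases h : p.2 > 1 <;> simp [h, ih]

-- dedup-first commutes with filter
lemma ofList_filter (p : String → Bool) (l : List String) :
    PySem.Set.ofList (l.filter p) = (PySem.Set.ofList l).filter p := by
  induction l with
  | nil => rfl
  | cons x xs ih =>
    rw [PySem.Set.ofList_cons, List.filter_cons]
    by_cases hx : p x = true
    · rw [if_pos hx, PySem.Set.ofList_cons, ih, List.filter_cons, if_pos hx]
      simp only [PySem.Set.discard, List.filter_filter, Bool.and_comm]
    · rw [if_neg hx, ih, List.filter_cons, if_neg hx]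
      simp only [PySem.Set.discard, List.filter_filter]
      apply List.filter_congr
      intro a _
      by_cases ha : p a = true
      · have : (a == x) = false := by
          by_contra h
          have : a = x := by
            have := eq_of_beq (Bool.of_not_eq_false h)
            exact this
          subst this; exact hx ha
        simp [ha, this]
      · simp [Bool.of_not_eq_true ha]

-- B's loop appends one formatted entry per distinct captain of rest, with its count in rest
lemma fcLoop_eq (n : Nat) : ∀ (l acc : List String), l.length ≤ n →
    fcLoop acc l = acc ++ (PySem.Set.ofList l).map
      (fun c => fcFmt (c, (l.count c : Int))) := by
  induction n with
  | zero =>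
    intro l acc h
    have : l = [] := List.length_eq_zero_iff.mp (Nat.le_zero.mp h)
    subst this; rw [fcLoop.eq_1]; simp
  | succ n ih =>
    intro l acc h
    match l with
    | [] => rw [fcLoop.eq_1]; simp
    | cap :: tl =>
      rw [fcLoop.eq_2]
      have hsplit : ∀ (ys : List String),
          (ys.filter (fun c => !(c == cap))).length + ys.count cap = ys.length := by
        intro ys
        induction ys with
        | nil => simp
        | cons y ys ihy =>
          by_cases hy : (y == cap) = true <;>
            simp [List.count_cons, hy] <;> omega
      have hlen : (tl.filter (fun c => !(c == cap))).length ≤ n := by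
        have := hsplit tl
        simp only [List.length_cons] at h
        omega
      rw [ih _ _ hlen, PySem.Set.ofList_cons, List.map_cons, List.append_assoc]
      -- the computed count is the multiplicity of cap in cap :: tl
      have hcount : ((cap :: tl).length : Int)
          - ((tl.filter (fun c => !(c == cap))).length : Int)
          = ((cap :: tl).count cap : Int) := by
        have := hsplit tl
        rw [List.count_cons_self]
        simp only [List.length_cons]
        push_cast
        omega
      rw [hcount, List.singleton_append]
      simp only [fcFmt]
      refine congrArg (acc ++ ·) (congrArg₂ List.cons rfl ?_)
      -- remaining entries: distincts of the filtered tail with unchanged counts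
      rw [ofList_filter]
      have hdis : (PySem.Set.discard (PySem.Set.ofList tl) cap : List String)
          = (PySem.Set.ofList tl).filter (fun c => !(c == cap)) := rfl
      rw [hdis]
      apply List.map_congr_left
      intro c hc
      have hne : (c == cap) = false := by
        have := (List.mem_filter.mp hc).2
        simpa using this
      have hnec : c ≠ cap := by
        intro hcc; subst hcc; simp at hne
      have h1 : List.count c (cap :: tl) = List.count c tl := by
        simp [Ne.symm hnec]
      have h2 : List.count c (tl.filter (fun c => !(c == cap))) = List.count c tl :=
        List.count_filter (by simp [hne])
      rw [h1, h2]

theorem format_captains_spec : Claim_equal_format_captains := by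
  intro xs _
  show format_captains xs = format_captains_alt xs
  have hB : format_captains_alt xs =
      (PySem.Set.ofList xs).map (fun c => fcFmt (c, (xs.count c : Int))) := by
    rw [format_captains_alt, fcLoop_eq xs.length xs [] (Nat.le_refl _)]
    simp
  by_cases hnil : xs = []
  · subst hnil; simp [format_captains, hB]
  · rw [format_captains, if_neg hnil]
    simp only []
    rw [foldA, PySem.Dict.items_counter, List.map_map, hB]
    simp [Function.comp]
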